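-- pv_equiv track=rewrite | github.com/microsoft/Model_Based_Testing_Using_LLMs | tester/smtp/diff_testing.py | has_code_disagreement
-- ===== SOURCE A (Python) =====
-- def extract_code(resp) -> int:
--     """
--     Given one server's response from results.json, extract the numeric code.
--
--     Expected normal shape (from normalize_response_to_tuple):
--         [code: int, message: str]
--
--     Be defensive in case of older / malformed data.
--     """
--     # Normal case: list/tuple [code, message]
--     if isinstance(resp, (list, tuple)) and len(resp) >= 1:
--         try:
--             return int(resp[0])
--         except (ValueError, TypeError):
--             return 0
--
--     # Unexpected shapes → treat as code 0
--     return 0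
--
-- def has_code_disagreement(actual_response) -> bool:
--     """
--     Return True if the response codes differ among any servers.
--     """
--     codes = []
--
--     for server_name, resp in actual_response.items():
--         code = extract_code(resp)
--         codes.append(code)
--
--     # If we have fewer than 2 codes, can't compare meaningfully
--     if len(codes) < 2:
--         return False
--
--     # Disagreement iff not all codes are equal
--     return len(set(codes)) > 1
-- ===== SOURCE B (Python) =====
-- def extract_code(resp) -> int:
--     if isinstance(resp, (list, tuple)) and len(resp) >= 1:
--         try:
--             return int(resp[0])
--         except (ValueError, TypeError):
--             return 0
--     return 0
--
-- def has_code_disagreement(actual_response) -> bool: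
--     it = iter(actual_response.values())
--     try:
--         first = extract_code(next(it))
--     except StopIteration:
--         return False
--     for resp in it:
--         if extract_code(resp) != first:
--             return True
--     return False
-- ===== Notes on version B (the rewrite author's own statement) =====
-- stated objective: simpler
-- what changed: Instead of collecting all codes into a list and comparing the cardinality of a set built from it, B extracts the first response's code once and scans the remaining responses, returning True at the first differing code (early exit, no intermediate list or set).
import Mathlib
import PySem

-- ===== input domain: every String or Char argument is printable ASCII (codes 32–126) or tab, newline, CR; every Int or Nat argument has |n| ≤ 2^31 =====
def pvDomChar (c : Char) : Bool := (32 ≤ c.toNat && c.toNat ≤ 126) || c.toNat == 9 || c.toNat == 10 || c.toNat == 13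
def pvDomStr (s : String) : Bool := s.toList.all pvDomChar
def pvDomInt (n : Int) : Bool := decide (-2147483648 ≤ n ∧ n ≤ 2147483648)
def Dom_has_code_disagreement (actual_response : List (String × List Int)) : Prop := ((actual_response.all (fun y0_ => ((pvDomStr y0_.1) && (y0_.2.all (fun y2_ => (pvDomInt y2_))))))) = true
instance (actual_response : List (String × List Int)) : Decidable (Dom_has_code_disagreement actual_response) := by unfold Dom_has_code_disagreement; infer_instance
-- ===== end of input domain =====

-- B replaces A's list-of-codes + set-cardinality test by a single short-circuiting
-- scan that compares each code against the first one (objective: simpler).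

-- ===== PORT A =====
-- extract_code: resp is a list of ints here, so the isinstance check holds and
-- int(resp[0]) is resp[0]; the empty list (len < 1) yields 0.
def extract_code (resp : List Int) : Int :=
  match resp with
  | [] => 0
  | c :: _ => c

def has_code_disagreement (actual_response : List (String × List Int)) : Bool :=
  -- codes = []; for server_name, resp in actual_response.items(): codes.append(extract_code(resp))
  let codes := actual_response.foldl (fun cs p => cs ++ [extract_code p.2]) []
  if codes.length < 2 then false
  else decide (1 < (PySem.Set.ofList codes).length)

-- ===== PORT B =====
-- the 'for resp in it' loop of Source B after the first code has been taken
def hcdScan (first : Int) : List (String × List Int) → Bool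
  | [] => false
  | p :: rest => if extract_code p.2 != first then true else hcdScan first rest

def has_code_disagreement_alt (actual_response : List (String × List Int)) : Bool :=
  match actual_response with
  | [] => false                                  -- next(it) raises StopIteration
  | p :: rest => hcdScan (extract_code p.2) rest

-- ===== PRECONDITION & SPEC =====
def Spec_has_code_disagreement (actual_response : List (String × List Int)) (out : Bool) : Prop := out = has_code_disagreement_alt actual_response
instance (actual_response : List (String × List Int)) (out : Bool) : Decidable (Spec_has_code_disagreement actual_response out) := by unfold Spec_has_code_disagreement; infer_instance

-- ===== CLAIM (what is proved, stated in full; the proofs are below) =====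
def Claim_equal_has_code_disagreement : Prop := ∀ (actual_response : List (String × List Int)), Dom_has_code_disagreement actual_response → Spec_has_code_disagreement actual_response (has_code_disagreement actual_response)

-- ===== LEMMAS AND PROOFS =====

-- the accumulating append-loop builds the map
theorem hcd_foldl_map (l : List (String × List Int)) (acc : List Int) :
    l.foldl (fun cs p => cs ++ [extract_code p.2]) acc = acc ++ l.map (fun p => extract_code p.2) := by
  induction l generalizing acc with
  | nil => simp
  | cons p rest ih => simp [List.foldl_cons, ih]

-- a list with two distinct members and no duplicates has length > 1
theorem two_mem_one_lt (l : List Int) (h : l.Nodup) (a b : Int)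
    (ha : a ∈ l) (hb : b ∈ l) (hab : a ≠ b) : 1 < l.length := by
  match l with
  | [] => simp at ha
  | [x] =>
    simp at ha hb
    exact absurd (ha.trans hb.symm) hab
  | x :: y :: rest => simp only [List.length_cons]; omega

-- duplicated head collapses in set(·)
theorem ofList_cons_cons (c : Int) (l : List Int) :
    PySem.Set.ofList (c :: c :: l) = PySem.Set.ofList (c :: l) := by
  simp [PySem.Set.ofList_eq_foldl, List.foldl_cons, PySem.Set.add, PySem.Set.contains]

-- B's scan computes A's set-cardinality test with the first code prefixed
theorem hcdScan_eq_set (c : Int) (l : List (String × List Int)) :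
    hcdScan c l = decide (1 < (PySem.Set.ofList (c :: l.map (fun p => extract_code p.2))).length) := by
  induction l with
  | nil => simp [hcdScan, PySem.Set.ofList]
  | cons p rest ih =>
    by_cases hd : extract_code p.2 = c
    · simp [hcdScan, hd, ih, ofList_cons_cons]
    · have hc : c ∈ PySem.Set.ofList (c :: extract_code p.2 :: rest.map (fun p => extract_code p.2)) := by
        rw [PySem.Set.mem_ofList]; exact List.mem_cons_self ..
      have hd' : extract_code p.2 ∈ PySem.Set.ofList (c :: extract_code p.2 :: rest.map (fun p => extract_code p.2)) := by
        rw [PySem.Set.mem_ofList]; simp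
      have := two_mem_one_lt _ (PySem.Set.nodup_ofList _) _ _ hc hd' (Ne.symm hd)
      simp [hcdScan, hd, List.map_cons, this]

-- ===== VERDICT (by name: the statement is the Claim_ definition above) =====
theorem has_code_disagreement_spec : Claim_equal_has_code_disagreement := by
  intro ar _
  unfold Spec_has_code_disagreement has_code_disagreement has_code_disagreement_alt
  rw [hcd_foldl_map]
  match ar with
  | [] => simp
  | [p] => simp [hcdScan]
  | p :: q :: rest =>
    simp only [List.nil_append, List.map_cons, List.length_cons]
    rw [if_neg (by omega)]
    exact (hcdScan_eq_set (extract_code p.2) (q :: rest)).symm
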